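-- pv_equiv track=rewrite | github.com/AHOURMAROLAND/DLS-TG-IAI-OFFICEL | backend/app/services/draw_service.py | balanced_draw
-- ===== SOURCE A (Python) =====
-- def balanced_draw(players: list, group_count: int) -> dict:
--     """
--     Trie les joueurs par division DLL puis répartit équitablement dans les groupes.
--     Évite de mettre 2 tops ensemble autant que possible.
--     """
--     sorted_players = sorted(players, key=lambda p: (p["dll_division"], -p["dll_won"]))
--     groups = {f"G{chr(65+i)}": [] for i in range(group_count)}
--     group_keys = list(groups.keys())
--     # Serpentin : 0,1,2,3,3,2,1,0,0,1... pour mieux équilibrer les niveaux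
--     direction = 1
--     idx = 0
--     for i, player in enumerate(sorted_players):
--         groups[group_keys[idx]].append(player)
--         if direction == 1:
--             if idx == group_count - 1:
--                 direction = -1
--             else:
--                 idx += 1
--         else:
--             if idx == 0:
--                 direction = 1
--             else:
--                 idx -= 1
--     return groups
-- ===== SOURCE B (Python) =====
-- def balanced_draw(players: list, group_count: int) -> dict:
--     """Same draw via a precomputed serpentine key order (keys + reversed keys),
--     indexed by i mod its length -- no direction/idx state machine."""
--     keys = [f"G{chr(65 + i)}" for i in range(group_count)]
--     groups = {k: [] for k in keys}
--     order = keys + keys[::-1]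
--     ranked = sorted(players, key=lambda p: (p["dll_division"], -p["dll_won"]))
--     for i, player in enumerate(ranked):
--         groups[order[i % len(order)]].append(player)
--     return groups
-- ===== Notes on version B (the rewrite author's own statement) =====
-- stated objective: simpler
-- what changed: B drops A's direction/idx serpentine state machine and instead precomputes the serpentine key order (keys + reversed keys) once, assigning player i to order[i % len(order)] with no branching or mutable direction state.
-- outside the precondition, e.g. on balanced_draw([{'dll_division': 1, 'dll_won': 0}], 0): A raises IndexError, B raises ZeroDivisionError
import Mathlib
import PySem

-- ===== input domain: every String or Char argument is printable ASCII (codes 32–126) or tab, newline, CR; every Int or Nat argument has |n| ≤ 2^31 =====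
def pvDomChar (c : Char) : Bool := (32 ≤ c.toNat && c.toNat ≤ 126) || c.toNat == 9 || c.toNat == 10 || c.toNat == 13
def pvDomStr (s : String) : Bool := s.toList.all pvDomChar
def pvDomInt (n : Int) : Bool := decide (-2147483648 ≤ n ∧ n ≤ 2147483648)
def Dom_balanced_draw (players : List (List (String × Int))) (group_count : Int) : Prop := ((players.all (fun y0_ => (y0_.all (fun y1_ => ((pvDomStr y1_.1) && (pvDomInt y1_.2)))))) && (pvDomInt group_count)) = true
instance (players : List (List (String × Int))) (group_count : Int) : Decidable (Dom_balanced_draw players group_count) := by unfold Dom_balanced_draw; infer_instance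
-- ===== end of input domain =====

-- B replaces A's direction/idx serpentine state machine by a precomputed key order
-- (keys + reversed keys) indexed with i mod its length (objective: simpler, same cost).

-- ===== PORT A =====
-- p["dll_division"] / p["dll_won"]: first-match lookup; a missing key is a Python
-- KeyError (excluded by Pre_), where getD returns the unused default 0.
def pvDivKey (p : List (String × Int)) : Int := (PySem.Dict.mk p).getD "dll_division" 0
def pvWonKey (p : List (String × Int)) : Int := -((PySem.Dict.mk p).getD "dll_won" 0)
-- f"G{chr(65+i)}" — exact for 0 ≤ i while 65+i is a Unicode scalar value (65+i < 0xD800 inside Pre_)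
def pvGroupName (i : Int) : String := String.ofList ['G', Char.ofNat (65 + i).toNat]

-- the loop body of A, named: state (groups, direction, idx); group_keys[idx]:
-- none = IndexError (group_count ≤ 0 with nonempty players), excluded by Pre_
def pvStepA (group_count : Int) (group_keys : List String)
    (st : PySem.Dict String (List (List (String × Int))) × Int × Int)
    (player : List (String × Int)) :
    PySem.Dict String (List (List (String × Int))) × Int × Int :=
  let key := (PySem.List.pyGet? group_keys st.2.2).getD ""
  let g := st.1.modify key [] (fun l => l ++ [player])
  if st.2.1 = 1 then
    if st.2.2 = group_count - 1 then (g, -1, st.2.2) else (g, st.2.1, st.2.2 + 1)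
  else
    if st.2.2 = 0 then (g, 1, st.2.2) else (g, st.2.1, st.2.2 - 1)

def balanced_draw (players : List (List (String × Int))) (group_count : Int) : List (String × List (List (String × Int))) :=
  let sorted_players := PySem.List.sorted2 players pvDivKey pvWonKey
  let groups : PySem.Dict String (List (List (String × Int))) :=
    (PySem.List.pyRange 0 group_count 1).foldl (fun d i => d.insert (pvGroupName i) []) PySem.Dict.empty
  let group_keys := groups.keys
  (sorted_players.foldl (pvStepA group_count group_keys) (groups, 1, 0)).1.items

-- ===== PORT B =====
-- the loop body of B, named: i % len(order) raises ZeroDivisionError when order = []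
-- (group_count ≤ 0 with nonempty players), excluded by Pre_
def pvStepB (order : List String)
    (g : PySem.Dict String (List (List (String × Int))))
    (ip : Int × List (String × Int)) :
    PySem.Dict String (List (List (String × Int))) :=
  let key := (PySem.List.pyGet? order (PySem.Int.mod ip.1 (order.length : Int))).getD ""
  g.modify key [] (fun l => l ++ [ip.2])

def balanced_draw_alt (players : List (List (String × Int))) (group_count : Int) : List (String × List (List (String × Int))) :=
  let keys := (PySem.List.pyRange 0 group_count 1).map pvGroupName
  let groups : PySem.Dict String (List (List (String × Int))) :=
    keys.foldl (fun d k => d.insert k []) PySem.Dict.empty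
  let order := keys ++ keys.reverse
  let ranked := PySem.List.sorted2 players pvDivKey pvWonKey
  ((PySem.List.enumerate ranked 0).foldl (pvStepB order) groups).items

-- ===== PRECONDITION & SPEC =====
-- Pre_ excludes ONLY inputs whose behaviour is not a value of the declared Lean types:
-- group_count ≤ 0 with nonempty players (A raises IndexError, B ZeroDivisionError);
-- a player missing the "dll_division"/"dll_won" key (A and B raise KeyError in the sort key);
-- duplicate keys inside one player's association list (such a list corresponds to no Python
-- dict input — the Python literal collapses the duplicates); and group_count ≥ 55232, where
-- the RETURNED dict's keys from 'G'+chr(0xD800) on contain lone UTF-16 surrogates — Python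
-- strs that are not sequences of Unicode scalar values and so are not values of the output
-- type List (String × …) (A and B agree there in Python; this is a representability
-- exclusion of the output value, not a size bound: every key below it is ported exactly).
def Pre_balanced_draw (players : List (List (String × Int))) (group_count : Int) : Prop :=
  (players = [] ∨ 1 ≤ group_count) ∧ group_count ≤ 55231 ∧
  ∀ p ∈ players, (PySem.Dict.mk p).contains "dll_division" = true ∧
    (PySem.Dict.mk p).contains "dll_won" = true ∧ (p.map Prod.fst).Nodup
instance (players : List (List (String × Int))) (group_count : Int) : Decidable (Pre_balanced_draw players group_count) := by unfold Pre_balanced_draw; infer_instance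

def pvWitness_balanced_draw : (List (List (String × Int))) × Int :=
  ([[("dll_division", 1), ("dll_won", 4)], [("dll_division", 2), ("dll_won", 0)],
    [("dll_division", 1), ("dll_won", 7)]], 2)

def Spec_balanced_draw (players : List (List (String × Int))) (group_count : Int) (out : List (String × List (List (String × Int)))) : Prop := out = balanced_draw_alt players group_count
instance (players : List (List (String × Int))) (group_count : Int) (out : List (String × List (List (String × Int)))) : Decidable (Spec_balanced_draw players group_count out) := by unfold Spec_balanced_draw; infer_instance

-- ===== CLAIM (what is proved, stated in full; the proofs are below) =====
def Claim_equal_balanced_draw : Prop := ∀ (players : List (List (String × Int))) (group_count : Int), Dom_balanced_draw players group_count → Pre_balanced_draw players group_count → Spec_balanced_draw players group_count (balanced_draw players group_count)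

-- ===== LEMMAS AND PROOFS =====

-- serpentine position and direction after i placements (proof-only helpers)
def serpIdx (n i : Nat) : Nat := if i % (2 * n) < n then i % (2 * n) else 2 * n - 1 - i % (2 * n)
def serpDir (n i : Nat) : Int := if i % (2 * n) < n then 1 else -1

lemma pv_charOfNat_toNat (n : Nat) (h : n < 55296) : (Char.ofNat n).toNat = n := by
  have hv : n.isValidChar := Or.inl h
  simp [Char.ofNat, hv, Char.ofNatAux, Char.toNat]

-- the keys of A's freshly built groups dict are exactly B's keys list
lemma pv_keys_nodup (gc : Int) (h55 : gc ≤ 55231) :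
    ((PySem.List.pyRange 0 gc 1).map pvGroupName).Nodup := by
  apply List.Nodup.map_on _ (PySem.List.nodup_pyRange_one 0 gc)
  intro i hi j hj hij
  rw [PySem.List.mem_pyRange_one] at hi hj
  unfold pvGroupName at hij
  have h2 : Char.ofNat (65 + i).toNat = Char.ofNat (65 + j).toNat := by
    have := congrArg String.toList hij
    simpa [String.toList_ofList] using this
  have h3 := congrArg Char.toNat h2
  rw [pv_charOfNat_toNat _ (by omega), pv_charOfNat_toNat _ (by omega)] at h3
  omega

lemma pv_keys (gc : Int) (h55 : gc ≤ 55231) :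
    ((PySem.List.pyRange 0 gc 1).foldl
        (fun d i => d.insert (pvGroupName i) ([] : List (List (String × Int)))) PySem.Dict.empty).keys
      = (PySem.List.pyRange 0 gc 1).map pvGroupName := by
  rw [PySem.Dict.keys_foldl_insert_key, PySem.Dict.keys_empty, PySem.Set.update_nil_left,
    PySem.Set.ofList_eq_self_of_nodup _ (pv_keys_nodup gc h55)]

-- both sides look up the same key at step i
lemma pv_key_eq (K : List String) (n i : Nat) (hn : 1 ≤ n) (hK : K.length = n) :
    (PySem.List.pyGet? (K ++ K.reverse) (PySem.Int.mod (i : Int) (((K ++ K.reverse).length : Nat) : Int))).getD ""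
      = (PySem.List.pyGet? K ((serpIdx n i : Nat) : Int)).getD "" := by
  have hlen : (K ++ K.reverse).length = 2 * n := by simp [hK]; omega
  rw [hlen, PySem.Int.mod_natCast, PySem.List.pyGet?_natCast, PySem.List.pyGet?_natCast]
  have h2n : 0 < 2 * n := by omega
  have hr : i % (2 * n) < 2 * n := Nat.mod_lt _ h2n
  unfold serpIdx
  by_cases h : i % (2 * n) < n
  · rw [List.getElem?_append_left (by omega)]
    simp [h]
  · rw [List.getElem?_append_right (by omega)]
    rw [List.getElem?_reverse (by omega)]
    simp only [h, if_false, hK]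
    congr 2
    omega

-- A's direction/idx state after one more step
lemma pv_state_step (n i : Nat) (gc : Int) (hn : 1 ≤ n) (hgc : gc = (n : Int)) :
    (if serpDir n i = 1 then
        if ((serpIdx n i : Nat) : Int) = gc - 1 then ((-1 : Int), ((serpIdx n i : Nat) : Int))
        else (serpDir n i, ((serpIdx n i : Nat) : Int) + 1)
      else
        if ((serpIdx n i : Nat) : Int) = 0 then ((1 : Int), ((serpIdx n i : Nat) : Int))
        else (serpDir n i, ((serpIdx n i : Nat) : Int) - 1))
      = (serpDir n (i + 1), ((serpIdx n (i + 1) : Nat) : Int)) := by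
  have h2n : 0 < 2 * n := by omega
  have h1 : 1 % (2 * n) = 1 := Nat.mod_eq_of_lt (by omega)
  have hr : i % (2 * n) < 2 * n := Nat.mod_lt _ h2n
  have hstep : (i + 1) % (2 * n) = if i % (2 * n) + 1 < 2 * n then i % (2 * n) + 1 else 0 := by
    rw [Nat.add_mod, h1]
    split_ifs with h
    · exact Nat.mod_eq_of_lt (by omega)
    · have he : i % (2 * n) + 1 = 2 * n := by omega
      rw [he, Nat.mod_self]
  unfold serpDir serpIdx
  rw [hstep]
  subst hgc
  generalize i % (2 * n) = r at hr ⊢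
  split_ifs <;> simp_all [Prod.ext_iff] <;> omega

lemma pv_step_eq (n i : Nat) (K : List String) (gc : Int) (hn : 1 ≤ n)
    (hK : K.length = n) (hgc : gc = (n : Int))
    (g : PySem.Dict String (List (List (String × Int)))) (p : List (String × Int)) :
    pvStepA gc K (g, serpDir n i, ((serpIdx n i : Nat) : Int)) p
      = (pvStepB (K ++ K.reverse) g ((i : Int), p), serpDir n (i + 1), ((serpIdx n (i + 1) : Nat) : Int)) := by
  unfold pvStepA pvStepB
  simp only []
  rw [pv_key_eq K n i hn hK]
  have hst := pv_state_step n i gc hn hgc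
  split_ifs at hst ⊢ <;> simp_all [Prod.ext_iff] <;> omega

-- the central invariant: A's loop from serpentine state i equals B's loop from index i
lemma pv_loop (n : Nat) (hn : 1 ≤ n) (K : List String) (hK : K.length = n)
    (gc : Int) (hgc : gc = (n : Int)) :
    ∀ (L : List (List (String × Int))) (i : Nat)
      (g : PySem.Dict String (List (List (String × Int)))),
    (L.foldl (pvStepA gc K) (g, serpDir n i, ((serpIdx n i : Nat) : Int))).1
      = (PySem.List.enumerate L (i : Int)).foldl (pvStepB (K ++ K.reverse)) g := by
  intro L
  induction L with
  | nil => intro i g; simp [PySem.List.enumerate_nil]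
  | cons p L ih =>
    intro i g
    rw [PySem.List.enumerate_cons, List.foldl_cons, List.foldl_cons]
    have hcast : (i : Int) + 1 = ((i + 1 : Nat) : Int) := by push_cast; ring
    rw [hcast, ← ih (i + 1) (pvStepB (K ++ K.reverse) g ((i : Int), p)),
      pv_step_eq n i K gc hn hK hgc]

-- ===== VERDICT (by name: the statement is the Claim_ definition above) =====
theorem balanced_draw_spec : Claim_equal_balanced_draw := by
  intro players gc hdom hpre
  obtain ⟨hcase, h55, hplayers⟩ := hpre
  unfold Spec_balanced_draw
  unfold balanced_draw balanced_draw_alt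
  simp only [List.foldl_map]
  rcases hcase with hemp | hgc1
  · subst hemp
    simp [PySem.List.sorted2, PySem.List.enumerate_nil]
  · have hn : 1 ≤ gc.toNat := by omega
    have hgc : gc = (gc.toNat : Int) := by omega
    have hK : ((PySem.List.pyRange 0 gc 1).map pvGroupName).length = gc.toNat := by
      rw [List.length_map, PySem.List.length_pyRange_one]
      omega
    rw [pv_keys gc h55]
    have h0 : serpDir gc.toNat 0 = 1 := by
      unfold serpDir
      rw [Nat.zero_mod, if_pos (by omega)]
    have h0' : ((serpIdx gc.toNat 0 : Nat) : Int) = 0 := by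
      unfold serpIdx
      rw [Nat.zero_mod, if_pos (by omega)]
      simp
    have := pv_loop gc.toNat hn ((PySem.List.pyRange 0 gc 1).map pvGroupName) hK gc hgc
      (PySem.List.sorted2 players pvDivKey pvWonKey) 0
      ((PySem.List.pyRange 0 gc 1).foldl (fun d i => d.insert (pvGroupName i) []) PySem.Dict.empty)
    rw [h0, h0'] at this
    rw [Nat.cast_zero] at this
    rw [this]
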